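-- pv_equiv track=rewrite | github.com/m1sterzer0/DaveProgrammingCompetitions | atcoder/python/arc100_109/arc100_F.py | iscolorful
-- ===== SOURCE A (Python) =====
-- def iscolorful(A,K) :
--     sb = [-1] * (K+1)
--     streak = 0
--     for (i,a) in enumerate(A) :
--         if sb[a]  == -1 :
--             streak += 1
--         else :
--             streak = min(streak+1,i-sb[a])
--         sb[a] = i
--         if streak == K : return True
--     return False
-- ===== SOURCE B (Python) =====
-- def iscolorful(A, K):
--     # Stage 1: record, for each position, the previous occurrence index of its value
--     # (the last-occurrence table sb is sized K+1, exactly as in the original).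
--     sb = [-1] * (K + 1)
--     prev = []
--     for i, a in enumerate(A):
--         prev.append(sb[a])
--         sb[a] = i
--     # Stage 2: a window of length K ending at t is all-distinct iff the prefix
--     # maximum of prev up to t is below the window start t-K+1 (earlier positions
--     # always satisfy prev[j] < j, so the prefix max equals the window max).
--     m = -1
--     for t, p in enumerate(prev):
--         m = max(m, p)
--         if t >= K - 1 and m < t - K + 1:
--             return True
--     return False
-- ===== Notes on version B (the rewrite author's own statement) =====
-- stated objective: alternative
-- what changed: Replaces A's online min-updated streak automaton by a two-stage method: first build the previous-occurrence array prev, then a prefix-maximum scan of prev decides whether some length-K window starts after every previous occurrence (since prev[j] < j, the prefix max equals the sliding-window max).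
-- intended difference: For K = 0 with a nonempty in-range list, A returns False although a length-0 window is vacuously distinct; B returns True, the vacuous-truth answer a maintainer would expect on this degenerate corner. — e.g. on iscolorful([0], 0): A returns false, B returns true
-- outside the precondition, e.g. on iscolorful([0, 5], 1): A returns True, B raises IndexError
import Mathlib
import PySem

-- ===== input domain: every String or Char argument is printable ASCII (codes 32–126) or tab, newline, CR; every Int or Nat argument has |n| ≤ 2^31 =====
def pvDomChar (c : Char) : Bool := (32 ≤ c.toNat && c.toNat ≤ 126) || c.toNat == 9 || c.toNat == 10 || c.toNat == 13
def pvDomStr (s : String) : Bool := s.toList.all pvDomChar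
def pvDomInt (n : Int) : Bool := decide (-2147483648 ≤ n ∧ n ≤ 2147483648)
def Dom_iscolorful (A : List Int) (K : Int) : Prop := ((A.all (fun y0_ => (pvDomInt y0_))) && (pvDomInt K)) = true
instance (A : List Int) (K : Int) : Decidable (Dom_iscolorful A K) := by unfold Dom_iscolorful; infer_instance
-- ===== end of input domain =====

-- B replaces A's online streak automaton with two staged passes (previous-occurrence array, then a prefix-maximum scan); same cost, alternative algorithm.

-- ===== PORT A =====
-- A's loop: state (i, sb, streak); sb[a] read/written with Python index semantics
-- (none = IndexError; the port returns false there, excluded by Pre_).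
def iscolorfulGoA (K : Int) : List Int → Int → List Int → Int → Bool
  | [], _, _, _ => false
  | a :: rest, i, sb, streak =>
    match PySem.List.pyGet? sb a with
    | none => false
    | some v =>
      let streak' := if v = -1 then streak + 1 else min (streak + 1) (i - v)
      let sb' := PySem.List.pySetD sb a i
      if streak' = K then true else iscolorfulGoA K rest (i + 1) sb' streak'

def iscolorful (A : List Int) (K : Int) : Bool :=
  iscolorfulGoA K A 0 (List.replicate (K + 1).toNat (-1 : Int)) 0

-- ===== PORT B =====
-- Stage 1 of B: 'prev.append(sb[a]); sb[a] = i' over A (none = IndexError, excluded by Pre_).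
def iscolorfulPrevB : List Int → Int → List Int → Option (List Int)
  | [], _, _ => some []
  | a :: rest, i, sb =>
    match PySem.List.pyGet? sb a with
    | none => none
    | some v =>
      match iscolorfulPrevB rest (i + 1) (PySem.List.pySetD sb a i) with
      | none => none
      | some ps => some (v :: ps)

-- Stage 2 of B: 'm = max(m, p); if t >= K-1 and m < t-K+1: return True'.
def iscolorfulScanB (K : Int) : List Int → Int → Int → Bool
  | [], _, _ => false
  | p :: rest, t, m =>
    let m' := max m p
    if K - 1 ≤ t ∧ m' < t - K + 1 then true else iscolorfulScanB K rest (t + 1) m'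

def iscolorful_alt (A : List Int) (K : Int) : Bool :=
  match iscolorfulPrevB A 0 (List.replicate (K + 1).toNat (-1 : Int)) with
  | none => false
  | some prev => iscolorfulScanB K prev 0 (-1)

-- ===== PRECONDITION & SPEC =====
-- Pre_ excludes inputs containing an element outside the index range of sb (length K+1), on
-- which Python raises IndexError when that element is reached; it thereby also excludes some
-- inputs on which A returns True before reaching such an element (B raises IndexError there,
-- since its first stage always traverses the whole list).
def Pre_iscolorful (A : List Int) (K : Int) : Prop := ∀ a ∈ A, -(K + 1) ≤ a ∧ a < K + 1
instance (A : List Int) (K : Int) : Decidable (Pre_iscolorful A K) := by unfold Pre_iscolorful; infer_instance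
def pvWitness_iscolorful : List Int × Int := ([1, 2, 1, 2], 2)

-- For K = 0 with a nonempty in-range list, A returns False although a length-0 window is
-- vacuously distinct; B returns True, the vacuous-truth answer expected on this corner.
def D_iscolorful (A : List Int) (K : Int) : Prop := A ≠ [] ∧ K = 0
instance (A : List Int) (K : Int) : Decidable (D_iscolorful A K) := by unfold D_iscolorful; infer_instance

def Spec_iscolorful (A : List Int) (K : Int) (out : Bool) : Prop := ¬ D_iscolorful A K → out = iscolorful_alt A K
instance (A : List Int) (K : Int) (out : Bool) : Decidable (Spec_iscolorful A K out) := by unfold Spec_iscolorful; infer_instance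

def pvDiffWitness_iscolorful : List Int × Int := ([0], 0)
def pvDiffWitnessOut_iscolorful : Bool × Bool := (false, true)

-- ===== CLAIM =====
def Claim_unchanged_iscolorful : Prop := ∀ (A : List Int) (K : Int), Dom_iscolorful A K → Pre_iscolorful A K → Spec_iscolorful A K (iscolorful A K)
def Claim_changed_iscolorful : Prop := Dom_iscolorful (pvDiffWitness_iscolorful.1) (pvDiffWitness_iscolorful.2) ∧ Pre_iscolorful (pvDiffWitness_iscolorful.1) (pvDiffWitness_iscolorful.2) ∧ D_iscolorful (pvDiffWitness_iscolorful.1) (pvDiffWitness_iscolorful.2) ∧ iscolorful (pvDiffWitness_iscolorful.1) (pvDiffWitness_iscolorful.2) = pvDiffWitnessOut_iscolorful.1 ∧ iscolorful_alt (pvDiffWitness_iscolorful.1) (pvDiffWitness_iscolorful.2) = pvDiffWitnessOut_iscolorful.2 ∧ pvDiffWitnessOut_iscolorful.1 ≠ pvDiffWitnessOut_iscolorful.2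
def Claim_exact_iscolorful : Prop := ∀ (A : List Int) (K : Int), Dom_iscolorful A K → Pre_iscolorful A K → D_iscolorful A K → iscolorful A K ≠ iscolorful_alt A K

-- ===== LEMMAS AND PROOFS =====

lemma mem_pySetD_cases {x v : Int} (xs : List Int) (i : Int)
    (h : x ∈ PySem.List.pySetD xs i v) : x ∈ xs ∨ x = v := by
  unfold PySem.List.pySetD PySem.List.pySet? at h
  cases hk : PySem.List.pyIdx? xs.length i with
  | none => rw [hk] at h; exact Or.inl h
  | some k =>
    rw [hk] at h
    exact List.mem_or_eq_of_mem_set h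

lemma pyGet?_some_of_range (xs : List Int) (a : Int)
    (h1 : -(xs.length : Int) ≤ a) (h2 : a < (xs.length : Int)) :
    ∃ v, PySem.List.pyGet? xs a = some v := by
  cases hg : PySem.List.pyGet? xs a with
  | none =>
    rw [PySem.List.pyGet?_eq_none_iff] at hg
    exact absurd ⟨h1, h2⟩ hg
  | some v => exact ⟨v, rfl⟩

-- Stage 1 of B never hits IndexError on in-range input.
lemma prevB_total : ∀ (rest : List Int) (i : Int) (sb : List Int),
    (∀ a ∈ rest, -(sb.length : Int) ≤ a ∧ a < (sb.length : Int)) →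
    ∃ ps, iscolorfulPrevB rest i sb = some ps := by
  intro rest
  induction rest with
  | nil => intro i sb _; exact ⟨[], rfl⟩
  | cons a rest ih =>
    intro i sb hr
    obtain ⟨v, hv⟩ := pyGet?_some_of_range sb a (hr a (by simp)).1 (hr a (by simp)).2
    have hlen : (PySem.List.pySetD sb a i).length = sb.length := PySem.List.length_pySetD sb a i
    obtain ⟨ps, hps⟩ := ih (i + 1) (PySem.List.pySetD sb a i)
      (by intro b hb; rw [hlen]; exact hr b (List.mem_cons_of_mem _ hb))
    exact ⟨v :: ps, by simp [iscolorfulPrevB, hv, hps]⟩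

-- Main invariant (K ≥ 1): A's streak equals i - 1 - m, where m is the running prefix
-- maximum (over -1 and the prev values seen so far) maintained by B's second stage.
lemma goA_eq_staged (K : Int) (_hK : 1 ≤ K) :
    ∀ (rest : List Int) (i m : Int) (sb : List Int),
    0 ≤ i → -1 ≤ m → i - m ≤ K →
    (∀ x ∈ sb, -1 ≤ x) →
    (sb.length : Int) = K + 1 →
    (∀ a ∈ rest, -(K + 1) ≤ a ∧ a < K + 1) →
    iscolorfulGoA K rest i sb (i - 1 - m) =
      (match iscolorfulPrevB rest i sb with
       | none => false
       | some ps => iscolorfulScanB K ps i m) := by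
  intro rest
  induction rest with
  | nil => intro i m sb _ _ _ _ _ _; rfl
  | cons a rest ih =>
    intro i m sb hi hm hiK hsb hlen hr
    obtain ⟨v, hv⟩ := pyGet?_some_of_range sb a (by rw [hlen]; exact (hr a (by simp)).1)
      (by rw [hlen]; exact (hr a (by simp)).2)
    have hvmem : v ∈ sb := PySem.List.mem_of_pyGet?_eq_some sb hv
    have hv1 : -1 ≤ v := hsb v hvmem
    -- streak' = i - max m v
    have hstreak : (if v = -1 then (i - 1 - m) + 1 else min ((i - 1 - m) + 1) (i - v))
        = i - max m v := by
      split_ifs with h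
      · subst h; omega
      · omega
    set m' := max m v with hm'
    have hm'1 : -1 ≤ m' := le_trans hm (le_max_left _ _)
    have hm'le : i - m' ≤ K := by have := le_max_left m v; omega
    -- the two return tests agree
    have hcond : ((i - m' = K) ↔ (K - 1 ≤ i ∧ m' < i - K + 1)) := by omega
    have hlen' : ((PySem.List.pySetD sb a i).length : Int) = K + 1 := by
      rw [PySem.List.length_pySetD]; exact hlen
    have hsb' : ∀ x ∈ PySem.List.pySetD sb a i, -1 ≤ x := by
      intro x hx
      rcases mem_pySetD_cases sb a hx with h | h
      · exact hsb x h
      · omega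
    obtain ⟨ps, hps⟩ := prevB_total rest (i + 1) (PySem.List.pySetD sb a i)
      (by intro b hb
          have h2 : ((PySem.List.pySetD sb a i).length : Int) = K + 1 := by
            rw [PySem.List.length_pySetD]; exact hlen
          rw [h2]; exact hr b (List.mem_cons_of_mem _ hb))
    simp only [iscolorfulGoA, iscolorfulPrevB, hv, hps, hstreak]
    by_cases hret : i - m' = K
    · rw [if_pos hret]
      have : iscolorfulScanB K (v :: ps) i m = true := by
        simp only [iscolorfulScanB, ← hm']
        rw [if_pos (hcond.mp hret)]
      rw [this]
    · rw [if_neg hret]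
      have hscan : iscolorfulScanB K (v :: ps) i m
          = iscolorfulScanB K ps (i + 1) m' := by
        simp only [iscolorfulScanB, ← hm']
        rw [if_neg (fun hc => hret (hcond.mpr hc))]
      rw [hscan]
      have harg : i - m' = (i + 1) - 1 - m' := by omega
      have := ih (i + 1) m' (PySem.List.pySetD sb a i) (by omega) hm'1 (by omega)
        hsb' hlen' (fun b hb => hr b (List.mem_cons_of_mem _ hb))
      rw [hps] at this
      rw [← harg] at this
      exact this

-- For K = 0, A's streak is always ≥ 1, so it never returns True.
lemma goA_zero_false : ∀ (rest : List Int) (i streak : Int) (sb : List Int),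
    0 ≤ streak → (∀ x ∈ sb, x ≤ i - 1) →
    iscolorfulGoA 0 rest i sb streak = false := by
  intro rest
  induction rest with
  | nil => intro _ _ _ _ _; rfl
  | cons a rest ih =>
    intro i streak sb hs hsb
    cases hv : PySem.List.pyGet? sb a with
    | none => simp [iscolorfulGoA, hv]
    | some v =>
      have hvle : v ≤ i - 1 := hsb v (PySem.List.mem_of_pyGet?_eq_some sb hv)
      have hpos : (1 : Int) ≤ (if v = -1 then streak + 1 else min (streak + 1) (i - v)) := by
        split_ifs <;> omega
      simp only [iscolorfulGoA, hv]
      rw [if_neg (by omega)]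
      apply ih
      · omega
      · intro x hx
        rcases mem_pySetD_cases sb a hx with h | h
        · have := hsb x h; omega
        · omega

-- ===== VERDICT =====
theorem iscolorful_spec : Claim_unchanged_iscolorful := by
  intro A K _ hpre hnD
  unfold iscolorful iscolorful_alt
  by_cases hK : 1 ≤ K
  · have hlen : ((List.replicate (K + 1).toNat (-1 : Int)).length : Int) = K + 1 := by
      simp; omega
    have := goA_eq_staged K hK A 0 (-1) (List.replicate (K + 1).toNat (-1 : Int))
      le_rfl le_rfl (by omega)
      (by intro x hx; rw [List.eq_of_mem_replicate hx])
      hlen hpre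
    simpa using this
  · -- K ≤ 0: Pre_ forces A = [] unless K = 0, and ¬D_ forces A = [] when K = 0
    have hA : A = [] := by
      cases A with
      | nil => rfl
      | cons a rest =>
        rcases hpre a (by simp) with ⟨h1, h2⟩
        by_cases h0 : K = 0
        · exact absurd ⟨by simp, h0⟩ hnD
        · omega
    subst hA; rfl

theorem iscolorful_changed : Claim_changed_iscolorful := by
  unfold Claim_changed_iscolorful; decide

theorem iscolorful_tight : Claim_exact_iscolorful := by
  intro A K _ hpre hD
  obtain ⟨hne, hK0⟩ := hD
  subst hK0
  cases A with
  | nil => exact absurd rfl hne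
  | cons a rest =>
    have hA : iscolorful (a :: rest) 0 = false := by
      unfold iscolorful
      apply goA_zero_false _ _ _ _ le_rfl
      intro x hx
      have := List.eq_of_mem_replicate hx
      omega
    have hlen : ((List.replicate ((0 : Int) + 1).toNat (-1 : Int)).length : Int) = 1 := by simp
    obtain ⟨v, hv⟩ := pyGet?_some_of_range (List.replicate ((0 : Int) + 1).toNat (-1 : Int)) a
      (by rw [hlen]; exact (hpre a (by simp)).1) (by rw [hlen]; exact (hpre a (by simp)).2)
    have hv1 : v = -1 := List.eq_of_mem_replicate
      (PySem.List.mem_of_pyGet?_eq_some _ hv)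
    obtain ⟨ps, hps⟩ := prevB_total rest ((0 : Int) + 1)
      (PySem.List.pySetD (List.replicate ((0 : Int) + 1).toNat (-1 : Int)) a 0)
      (by intro b hb
          have h2 : ((PySem.List.pySetD (List.replicate ((0 : Int) + 1).toNat (-1 : Int)) a 0).length : Int) = 1 := by
            rw [PySem.List.length_pySetD]; exact hlen
          rw [h2]; exact hpre b (List.mem_cons_of_mem _ hb))
    have hrep : List.replicate ((0 : Int) + 1).toNat (-1 : Int) = [-1] := rfl
    rw [hrep] at hv hps
    have hB : iscolorful_alt (a :: rest) 0 = true := by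
      unfold iscolorful_alt
      rw [hrep]
      simp only [iscolorfulPrevB, hv, hps, hv1]
      norm_num [iscolorfulScanB]
    rw [hA, hB]
    exact fun h => Bool.noConfusion h
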